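-- pv_equiv track=rewrite | github.com/harmening/signature_extraction | signature_extractor/segmentation.py | get_longest_signature_segment
-- ===== SOURCE A (Python) =====
-- def get_longest_signature_segment(seq):
--     count, prev_count = 0, 0
--     _range = -1, -1
--     for i in range(len(seq)-1, -1, -1):
--         if seq[i] == '1':
--             count += 1
--             if count > prev_count:
--                 _range = i, i + count
--         else:
--             if count > prev_count:
--                 _range = i+1, i+count+1
--                 prev_count = count
--             count = 0
--     return _range
-- ===== SOURCE B (Python) =====
-- def get_longest_signature_segment(seq):
--     # Scan left-to-right by maximal runs of equal characters; a '1'-run of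
--     # length >= the best so far replaces it (so ties keep the rightmost run).
--     best = (-1, -1)
--     best_len = 0
--     n = len(seq)
--     idx = 0
--     while idx < n:
--         j = idx + 1
--         while j < n and seq[j] == seq[idx]:
--             j += 1
--         if seq[idx] == '1' and j - idx >= best_len:
--             best = (idx, j)
--             best_len = j - idx
--         idx = j
--     return best
-- ===== Notes on version B (the rewrite author's own statement) =====
-- stated objective: alternative
-- what changed: Replaces A's right-to-left stateful count/prev_count scan with a left-to-right decomposition into maximal runs of equal characters, keeping the rightmost longest '1'-run via a >= comparison.
import Mathlib
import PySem

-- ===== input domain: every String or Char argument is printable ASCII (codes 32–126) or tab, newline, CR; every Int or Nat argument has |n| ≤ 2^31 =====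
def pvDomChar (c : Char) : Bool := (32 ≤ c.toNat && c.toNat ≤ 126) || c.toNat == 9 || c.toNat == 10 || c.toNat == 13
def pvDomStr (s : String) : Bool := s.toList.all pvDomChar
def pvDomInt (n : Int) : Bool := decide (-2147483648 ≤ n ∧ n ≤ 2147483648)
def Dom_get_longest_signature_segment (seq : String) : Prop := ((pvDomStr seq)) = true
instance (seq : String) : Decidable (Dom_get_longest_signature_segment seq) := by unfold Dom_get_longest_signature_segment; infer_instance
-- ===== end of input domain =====

-- B replaces A's right-to-left count/prev_count scan with a left-to-right
-- decomposition into maximal runs of equal characters (objective: alternative).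

-- ===== PORT A =====
def get_longest_signature_segment (seq : String) : Int × Int :=
  let cs := seq.toList
  let st := (PySem.List.pyRange ((cs.length : Int) - 1) (-1) (-1)).foldl
    (fun (st : Int × Int × (Int × Int)) (i : Int) =>
      let count := st.1
      let prev_count := st.2.1
      let rng := st.2.2
      if PySem.List.pyGet? cs i = some '1' then
        let count := count + 1
        if count > prev_count then (count, prev_count, (i, i + count))
        else (count, prev_count, rng)
      else
        if count > prev_count then (0, count, (i + 1, i + count + 1))
        else (0, prev_count, rng))
    (0, 0, (-1, -1))
  st.2.2

-- ===== PORT B =====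
-- length of the inner while-scan: how many leading chars of the list equal c
def pvRunLen (c : Char) : List Char → Nat
  | [] => 0
  | x :: xs => if x = c then pvRunLen c xs + 1 else 0

-- the outer while-loop of Source B, one iteration per maximal run
def pvBLoop (cs : List Char) (idx bestLen : Int) (best : Int × Int) : Int × Int :=
  match cs with
  | [] => best
  | c :: rest =>
      let k := pvRunLen c rest
      let l : Int := (k : Int) + 1
      if c = '1' ∧ bestLen ≤ l then
        pvBLoop (rest.drop k) (idx + l) l (idx, idx + l)
      else
        pvBLoop (rest.drop k) (idx + l) bestLen best
  termination_by cs.length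
  decreasing_by all_goals simp

def get_longest_signature_segment_alt (seq : String) : Int × Int :=
  pvBLoop seq.toList 0 0 (-1, -1)

-- ===== PRECONDITION & SPEC =====
def Spec_get_longest_signature_segment (seq : String) (out : Int × Int) : Prop := out = get_longest_signature_segment_alt seq
instance (seq : String) (out : Int × Int) : Decidable (Spec_get_longest_signature_segment seq out) := by unfold Spec_get_longest_signature_segment; infer_instance

-- ===== CLAIM (what is proved, stated in full; the proofs are below) =====
def Claim_equal_get_longest_signature_segment : Prop := ∀ (seq : String), Dom_get_longest_signature_segment seq → Spec_get_longest_signature_segment seq (get_longest_signature_segment seq)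

-- ===== LEMMAS AND PROOFS =====

-- A's loop as a structural right-fold over the character list (head processed last)
def pvStep (st : Int × Int × (Int × Int)) (c : Char) (i : Int) : Int × Int × (Int × Int) :=
  if c = '1' then
    if st.1 + 1 > st.2.1 then (st.1 + 1, st.2.1, (i, i + (st.1 + 1)))
    else (st.1 + 1, st.2.1, st.2.2)
  else
    if st.1 > st.2.1 then (0, st.1, (i + 1, i + st.1 + 1))
    else (0, st.2.1, st.2.2)

def pvARec : List Char → Int → Int × Int × (Int × Int)
  | [], _ => (0, 0, (-1, -1))
  | c :: rest, i => pvStep (pvARec rest (i + 1)) c i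

-- length of the leading run of '1's
def pvLead : List Char → Int
  | [] => 0
  | c :: rest => if c = '1' then pvLead rest + 1 else 0

lemma pvFoldrEq (full : List Char) : ∀ (cs : List Char) (j : Nat), full.drop j = cs →
    List.foldr (fun (i : Int) (st : Int × Int × (Int × Int)) =>
      let count := st.1
      let prev_count := st.2.1
      let rng := st.2.2
      if PySem.List.pyGet? full i = some '1' then
        let count := count + 1
        if count > prev_count then (count, prev_count, (i, i + count))
        else (count, prev_count, rng)
      else
        if count > prev_count then (0, count, (i + 1, i + count + 1))
        else (0, prev_count, rng))
      (0, 0, (-1, -1))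
      (PySem.List.pyRange (j : Int) (full.length : Int) 1)
    = pvARec cs j := by
  intro cs
  induction cs with
  | nil =>
      intro j h
      rw [PySem.List.pyRange_one_eq_nil (by
        have := List.drop_eq_nil_iff.mp h
        exact_mod_cast this)]
      rfl
  | cons c rest ih =>
      intro j h
      have hj : j < full.length := by
        by_contra h'
        rw [List.drop_eq_nil_of_le (by omega)] at h
        cases h
      have hcons : PySem.List.pyRange (j : Int) (full.length : Int) 1
          = (j : Int) :: PySem.List.pyRange ((j : Int) + 1) (full.length : Int) 1 :=
        PySem.List.pyRange_one_cons (by exact_mod_cast hj)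
      have hcast : ((j : Int) + 1) = (((j + 1 : Nat)) : Int) := by push_cast; ring
      have hdrop : full.drop (j + 1) = rest := by
        have ht : full.drop (j + 1) = (full.drop j).tail := by
          rw [← List.tail_drop]
        rw [ht, h]
        rfl
      have hget : PySem.List.pyGet? full (j : Int) = some c := by
        rw [PySem.List.pyGet?_natCast]
        have h0 : (full.drop j)[0]? = some c := by rw [h]; rfl
        simpa using h0
      rw [hcons, hcast, List.foldr_cons, ih (j + 1) hdrop]
      show _ = pvStep (pvARec rest (↑j + 1)) c ↑j
      rw [hcast]
      simp [pvStep, hget]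

lemma pvAeq (seq : String) : get_longest_signature_segment seq = (pvARec seq.toList 0).2.2 := by
  have h1 : PySem.List.pyRange ((seq.toList.length : Int) - 1) (-1) (-1)
      = (PySem.List.pyRange 0 (seq.toList.length : Int) 1).reverse := by
    have := PySem.List.pyRange_neg_one_eq_reverse ((seq.toList.length : Int) - 1) (-1)
    simpa using this
  have h2 := pvFoldrEq seq.toList seq.toList 0 (by simp)
  rw [Nat.cast_zero] at h2
  simp only [get_longest_signature_segment, h1, List.foldl_reverse, h2]

lemma pvInv (cs : List Char) : ∀ (i : Int),
    0 ≤ (pvARec cs i).1 ∧ 0 ≤ (pvARec cs i).2.1 ∧ (pvARec cs i).1 = pvLead cs ∧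
    ((pvARec cs i).2.1 < (pvARec cs i).1 → (pvARec cs i).2.2 = (i, i + (pvARec cs i).1)) := by
  induction cs with
  | nil => intro i; simp [pvARec, pvLead]
  | cons c rest ih =>
      intro i
      obtain ⟨h1, h2, h3, h4⟩ := ih (i + 1)
      rcases hs : pvARec rest (i + 1) with ⟨a, p, r⟩
      rw [hs] at h1 h2 h3 h4
      simp only at h1 h2 h3 h4
      by_cases hc : c = '1'
      · subst hc
        simp only [pvARec, pvStep, hs, pvLead, if_true]
        by_cases h5 : a + 1 > p
        · rw [if_pos h5]
          refine ⟨?_, ?_, ?_, fun _ => rfl⟩ <;> simp <;> omega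
        · rw [if_neg h5]
          refine ⟨?_, ?_, ?_, fun hlt => ?_⟩ <;> simp <;> try omega
          exact absurd hlt (by omega)
      · simp only [pvARec, pvStep, hs, pvLead, if_neg hc]
        by_cases h5 : a > p
        · rw [if_pos h5]
          refine ⟨?_, ?_, ?_, fun hlt => ?_⟩ <;> simp <;> try omega
          exact absurd hlt (by simp; omega)
        · rw [if_neg h5]
          refine ⟨?_, ?_, ?_, fun hlt => ?_⟩ <;> simp <;> try omega
          exact absurd hlt (by simp; omega)

lemma pvBlockOnes (l : Nat) : ∀ (rest : List Char) (i c0 p : Int) (r : Int × Int),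
    pvARec rest (i + l) = (c0, p, r) → (p < c0 → r = (i + l, i + l + c0)) →
    pvARec (List.replicate l '1' ++ rest) i
      = (c0 + l, p, if p < c0 + l then (i, i + (c0 + l)) else r) := by
  induction l with
  | zero =>
      intro rest i c0 p r hs hr
      simp only [List.replicate_zero, List.nil_append, Nat.cast_zero, add_zero] at *
      rw [hs]
      by_cases hp : p < c0
      · rw [if_pos hp, hr hp]
      · rw [if_neg hp]
  | succ l ih =>
      intro rest i c0 p r hs hr
      have harg : i + 1 + (l : Int) = i + ((l : Nat) + 1 : Nat) := by push_cast; ring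
      have h1 := ih rest (i + 1) c0 p r (by rw [harg]; exact hs)
        (by rw [harg]; exact hr)
      simp only [List.replicate_succ, List.cons_append, pvARec, h1, pvStep, if_true]
      push_cast
      by_cases h5 : p < c0 + l + 1
      · rw [if_pos (by simp; omega), if_pos (by omega)]
        simp [Prod.ext_iff] <;> omega
      · rw [if_neg (by simp; omega), if_neg (by omega), if_neg (by simp; omega)]
        simp [Prod.ext_iff] <;> omega

lemma pvBlockOther (c : Char) (hc : ¬ c = '1') : ∀ (l : Nat), 1 ≤ l →
    ∀ (rest : List Char) (i c0 p : Int) (r : Int × Int),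
    pvARec rest (i + l) = (c0, p, r) → 0 ≤ c0 → 0 ≤ p → (p < c0 → r = (i + l, i + l + c0)) →
    pvARec (List.replicate l c ++ rest) i = (0, if p < c0 then c0 else p, r) := by
  intro l
  induction l with
  | zero => omega
  | succ l ih =>
      intro _ rest i c0 p r hs hc0 hp hr
      rcases Nat.eq_zero_or_pos l with hl0 | hl0
      · subst hl0
        simp only [Nat.zero_add, List.replicate_one, List.singleton_append, pvARec, pvStep, if_neg hc]
        have hone : pvARec rest (i + 1) = (c0, p, r) := by
          have h11 : i + 1 = i + ((0 : Nat) + 1 : Nat) := by push_cast; ring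
          rw [h11]; exact hs
        rw [hone]
        by_cases h5 : c0 > p
        · rw [if_pos (by simpa using h5), if_pos (by omega), hr (by omega)]
          simp [Prod.ext_iff] <;> omega
        · rw [if_neg (by simpa using h5), if_neg (by omega)]
      · have harg : i + 1 + (l : Int) = i + ((l : Nat) + 1 : Nat) := by push_cast; ring
        have h1 := ih hl0 rest (i + 1) c0 p r (by rw [harg]; exact hs) hc0 hp
          (by rw [harg]; exact hr)
        simp only [List.replicate_succ, List.cons_append, pvARec, h1, pvStep, if_neg hc]
        rw [if_neg (by simp; split_ifs <;> omega)]

lemma pvRunSplit (c : Char) : ∀ (rest : List Char),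
    rest = List.replicate (pvRunLen c rest) c ++ rest.drop (pvRunLen c rest) ∧
    (∀ d, (rest.drop (pvRunLen c rest)).head? = some d → d ≠ c) := by
  intro rest
  induction rest with
  | nil => simp [pvRunLen]
  | cons x xs ih =>
      by_cases hx : x = c
      · subst hx
        have hk : pvRunLen x (x :: xs) = pvRunLen x xs + 1 := by simp [pvRunLen]
        rw [hk]
        simp only [List.replicate_succ, List.drop_succ_cons, List.cons_append]
        exact ⟨congrArg _ ih.1, ih.2⟩
      · simp [pvRunLen, hx]

lemma pvLeadZero (cs : List Char) (h : ∀ d, cs.head? = some d → d ≠ '1') : pvLead cs = 0 := by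
  cases cs with
  | nil => rfl
  | cons c rest => simp [pvLead, h c (by simp)]

lemma pvMain : ∀ (n : Nat) (cs : List Char), cs.length ≤ n → ∀ (i bl : Int) (b : Int × Int),
    0 ≤ bl → (bl = 0 → b = (-1, -1)) →
    pvBLoop cs i bl b
      = (if bl ≤ max (pvARec cs i).1 (pvARec cs i).2.1 then (pvARec cs i).2.2 else b) := by
  intro n
  induction n with
  | zero =>
      intro cs hlen i bl b hbl hb
      have : cs = [] := List.eq_nil_of_length_eq_zero (by omega)
      subst this
      simp only [pvBLoop, pvARec]
      by_cases h : bl ≤ max (0 : Int) 0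
      · rw [if_pos h]; exact hb (by omega)
      · rw [if_neg h]
  | succ n ih =>
      intro cs hlen i bl b hbl hb
      cases cs with
      | nil =>
          simp only [pvBLoop, pvARec]
          by_cases h : bl ≤ max (0 : Int) 0
          · rw [if_pos h]; exact hb (by omega)
          · rw [if_neg h]
      | cons c rest =>
          obtain ⟨hsplit, hhead⟩ := pvRunSplit c rest
          set k := pvRunLen c rest with hk
          have hcs : c :: rest = List.replicate (k + 1) c ++ rest.drop k := by
            rw [List.replicate_succ, List.cons_append]
            exact congrArg _ hsplit
          have hbase : i + ((k : Int) + 1) = i + (((k + 1 : Nat)) : Int) := by push_cast; ring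
          rcases hA : pvARec (rest.drop k) (i + (((k + 1 : Nat)) : Int)) with ⟨c0, p, r⟩
          have inv := pvInv (rest.drop k) (i + (((k + 1 : Nat)) : Int))
          rw [hA] at inv
          simp only at inv
          obtain ⟨hC0, hP, hLd, hR⟩ := inv
          have hlen' : (rest.drop k).length ≤ n := by
            have h1 : (rest.drop k).length = rest.length - k := List.length_drop
            simp at hlen
            omega
          simp only [pvBLoop]
          by_cases hc : c = '1'
          · subst hc
            have hc0 : c0 = 0 := by
              rw [hLd, pvLeadZero _ (fun d hd => hhead d hd)]
            subst hc0
            have hAside := pvBlockOnes (k + 1) (rest.drop k) i 0 p r hA (fun h => hR h)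
            rw [hcs, hAside]
            by_cases hbl1 : bl ≤ (k : Int) + 1
            · rw [if_pos ⟨rfl, hbl1⟩]
              rw [hbase, ih (rest.drop k) hlen' _ _ _ (by push_cast; omega) (by push_cast; omega)]
              rw [hA]
              simp only
              push_cast
              split_ifs <;> first | rfl | (exfalso; omega) | (simp [Prod.ext_iff] <;> omega)
            · rw [if_neg (fun hand => hbl1 hand.2)]
              rw [hbase, ih (rest.drop k) hlen' _ _ _ hbl hb]
              rw [hA]
              simp only
              push_cast
              split_ifs <;> first | rfl | (exfalso; omega) | (simp [Prod.ext_iff] <;> omega)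
          · have hAside := pvBlockOther c hc (k + 1) (by omega) (rest.drop k) i c0 p r hA hC0 hP
              (fun h => hR h)
            rw [hcs, hAside]
            rw [if_neg (fun hand => hc hand.1)]
            rw [hbase, ih (rest.drop k) hlen' _ _ _ hbl hb]
            rw [hA]
            simp only
            split_ifs <;> first | rfl | (exfalso; omega)

-- ===== VERDICT (by name: the statement is the Claim_ definition above) =====
theorem get_longest_signature_segment_spec : Claim_equal_get_longest_signature_segment := by
  intro seq _
  unfold Spec_get_longest_signature_segment get_longest_signature_segment_alt
  rw [pvAeq]
  obtain ⟨h1, h2, -, -⟩ := pvInv seq.toList 0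
  rw [pvMain seq.toList.length seq.toList le_rfl 0 0 (-1, -1) le_rfl (fun _ => rfl)]
  rw [if_pos (by omega : (0:Int) ≤ max (pvARec seq.toList 0).1 (pvARec seq.toList 0).2.1)]
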